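-- pv_equiv track=rewrite | github.com/andromeda-galaxyyy/simulation | topo/distributed/topobuilder.py | generate_mac
-- ===== SOURCE A (Python) =====
-- def generate_mac(id_):
--     id_ = int(id_) + 1
--
--     def base_16(num):
--         res = []
--         num = int(num)
--         if num == 0:
--             return "0"
--         while num > 0:
--             left = num % 16
--             res.append(left if left < 10 else chr(ord('a') + (left - 10)))
--             num //= 16
--         res.reverse()
--         return "".join(map(str, res))
--
--     raw_str = base_16(id_)
--     if len(raw_str) > 12:
--         raise Exception("Invalid id")
--     # reverse
--     raw_str = raw_str[::-1]
--     to_complete = 12 - len(raw_str)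
--     while to_complete > 0:
--         raw_str += "0"
--         to_complete -= 1
--     mac_addr = ":".join([raw_str[i:i + 2] for i in range(0, len(raw_str), 2)])
--     mac_addr = mac_addr[::-1]
--     return mac_addr
-- ===== SOURCE B (Python) =====
-- def generate_mac(id_):
--     n = int(id_) + 1
--     h = format(n, 'x') if n > 0 else '0'
--     if len(h) > 12:
--         raise Exception("Invalid id")
--     h = h.zfill(12)
--     return ':'.join(h[i:i + 2] for i in range(0, 12, 2))
-- ===== Notes on version B (the rewrite author's own statement) =====
-- stated objective: simpler
-- what changed: B replaces A's manual base-16 digit loop, the two string reversals and the right-padding while-loop with builtin hex formatting (format(n,'x')), a left zero-fill and a direct pair grouping.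
import Mathlib
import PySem

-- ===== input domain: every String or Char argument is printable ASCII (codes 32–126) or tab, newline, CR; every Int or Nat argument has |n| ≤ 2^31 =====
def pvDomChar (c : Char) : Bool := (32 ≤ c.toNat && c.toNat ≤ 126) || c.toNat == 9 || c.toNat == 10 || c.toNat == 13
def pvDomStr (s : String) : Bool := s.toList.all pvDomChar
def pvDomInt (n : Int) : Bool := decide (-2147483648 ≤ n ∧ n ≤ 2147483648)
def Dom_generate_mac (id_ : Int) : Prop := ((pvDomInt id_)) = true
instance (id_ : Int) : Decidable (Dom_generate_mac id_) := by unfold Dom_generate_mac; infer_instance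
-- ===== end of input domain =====

-- B computes the same MAC string via builtin hex formatting + left zero-fill instead of A's manual
-- base-16 digit loop, double reversal and right-pad loop (objective: simpler).


-- ===== PORT A =====
-- the value appended in base_16's loop: left if left < 10 else chr(ord('a') + (left - 10)).
-- A applies str() only at join time; here each entry is stored already as its str() value (same value).
def pyBase16Digit (left : Int) : String :=
  if left < 10 then PySem.Int.toStr left
  else String.ofList [Char.ofNat ('a'.toNat + (left - 10).toNat)]

-- 'while num > 0: left = num % 16; res.append(...); num //= 16'
def base16Loop (num : Int) (res : List String) : List String :=
  if 0 < num then
    base16Loop (PySem.Int.floordiv num 16) (res ++ [pyBase16Digit (PySem.Int.mod num 16)])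
  else res
termination_by num.toNat
decreasing_by rw [PySem.Int.floordiv_eq_ediv_of_pos (by omega : (0:Int) < 16)]; omega

def base_16 (num : Int) : String :=
  if num = 0 then "0"
  else PySem.Str.join "" ((base16Loop num []).reverse)   -- res.reverse(); "".join(map(str, res))

-- 'while to_complete > 0: raw_str += "0"; to_complete -= 1', counted on the nonnegative counter
def padLoop (s : List Char) : Nat → List Char
  | 0 => s
  | k + 1 => padLoop (s ++ ['0']) k

def generate_mac (id_ : Int) : String :=
  let id2 := id_ + 1
  let raw := base_16 id2
  if 12 < PySem.Str.len raw then ""   -- raise Exception("Invalid id") — unreachable for |id_| ≤ 2^31 (Dom)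
  else
    let r1 : List Char := raw.toList.reverse            -- raw_str[::-1]
    let r2 : List Char := padLoop r1 ((12 - (r1.length : Int)).toNat)
    let mac := PySem.Str.join ":"
      ((PySem.List.pyRange 0 (r2.length : Int) 2).map
        (fun i => String.ofList (PySem.List.slice r2 (some i) (some (i + 2)))))
    String.ofList mac.toList.reverse                     -- mac_addr[::-1]

-- ===== PORT B =====
def hexChar (d : Nat) : Char :=
  if d < 10 then Char.ofNat ('0'.toNat + d) else Char.ofNat ('a'.toNat + (d - 10))

-- port of format(n, 'x') for n > 0 (exact there): most-significant-first hex digits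
def toHex (n : Nat) : List Char :=
  if n < 16 then [hexChar n] else toHex (n / 16) ++ [hexChar (n % 16)]
termination_by n
decreasing_by omega

def generate_mac_alt (id_ : Int) : String :=
  let n := id_ + 1
  let h : List Char := if 0 < n then toHex n.toNat else ['0']
  if 12 < h.length then ""   -- raise Exception("Invalid id") — unreachable for |id_| ≤ 2^31 (Dom)
  else
    let h12 := List.replicate (12 - h.length) '0' ++ h   -- h.zfill(12)
    PySem.Str.join ":"
      ((PySem.List.pyRange 0 12 2).map
        (fun i => String.ofList (PySem.List.slice h12 (some i) (some (i + 2)))))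

-- ===== PRECONDITION & SPEC =====
def Spec_generate_mac (id_ : Int) (out : String) : Prop := out = generate_mac_alt id_
instance (id_ : Int) (out : String) : Decidable (Spec_generate_mac id_ out) := by unfold Spec_generate_mac; infer_instance

-- ===== CLAIM (what is proved, stated in full; the proofs are below) =====
def Claim_equal_generate_mac : Prop := ∀ (id_ : Int), Dom_generate_mac id_ → Spec_generate_mac id_ (generate_mac id_)

-- ===== LEMMAS AND PROOFS =====

lemma digit_eq (d : Nat) (hd : d < 16) :
    pyBase16Digit (d : Int) = String.ofList [hexChar d] := by
  interval_cases d <;> rfl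

lemma inter_flat : ∀ (cs : List Char),
    (List.intersperse ([] : List Char) (cs.map (fun c => [c]))).flatten = cs := by
  intro cs
  induction cs with
  | nil => rfl
  | cons c t ih =>
      cases t with
      | nil => rfl
      | cons d t' => simp_all

lemma join_singletons (cs : List Char) :
    PySem.Str.join "" (cs.map (fun c => String.ofList [c])) = String.ofList cs := by
  simp [PySem.Str.join, PySem.Chars.join, List.intercalate]
  have h : (String.toList ∘ fun c => String.ofList [c]) = (fun c : Char => [c]) := by
    funext c; simp
  rw [h, inter_flat]

lemma base16Loop_spec : ∀ m : Nat, 0 < m → ∀ res : List String,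
    base16Loop (m : Int) res = res ++ ((toHex m).reverse.map (fun c => String.ofList [c])) := by
  intro m
  induction m using Nat.strong_induction_on with
  | _ m ih =>
    intro hm res
    rw [base16Loop, if_pos (by exact_mod_cast hm)]
    have hfd : PySem.Int.floordiv (m:Int) 16 = ((m/16 : Nat) : Int) := by
      exact_mod_cast PySem.Int.floordiv_natCast m 16
    have hmd : PySem.Int.mod (m:Int) 16 = ((m%16 : Nat) : Int) := by
      exact_mod_cast PySem.Int.mod_natCast m 16
    rw [hfd, hmd, digit_eq (m%16) (by omega)]
    by_cases h16 : m < 16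
    · have hdz : m / 16 = 0 := by omega
      rw [hdz]
      rw [base16Loop, if_neg (by simp)]
      rw [toHex, if_pos h16]
      have hmm : m % 16 = m := by omega
      simp [hmm]
    · conv_rhs => rw [toHex]
      rw [if_neg h16, ih (m/16) (by omega) (by omega)]
      simp

lemma toHex_len : ∀ (k m : Nat), 0 < m → m < 16 ^ k → (toHex m).length ≤ k := by
  intro k
  induction k with
  | zero => intro m hm hlt; simp at hlt; omega
  | succ k ih =>
      intro m hm hlt
      rw [toHex]
      by_cases h16 : m < 16
      · simp [h16]
      · rw [if_neg h16]
        have := ih (m / 16) (by omega) (by rw [pow_succ] at hlt; omega)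
        simp
        omega




lemma padLoop_spec : ∀ (k : Nat) (s : List Char), padLoop s k = s ++ List.replicate k '0' := by
  intro k
  induction k with
  | zero => intro s; simp [padLoop]
  | succ k ih =>
      intro s
      simp [padLoop, ih, List.replicate_succ]

lemma group_reverse (r : List Char) (hr : r.length = 12) :
    String.ofList ((PySem.Str.join ":" ((PySem.List.pyRange 0 12 2).map
        (fun i => String.ofList (PySem.List.slice r (some i) (some (i + 2)))))).toList.reverse)
    = PySem.Str.join ":" ((PySem.List.pyRange 0 12 2).map
        (fun i => String.ofList (PySem.List.slice r.reverse (some i) (some (i + 2))))) := by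
  rcases r with _|⟨x1,r⟩; · simp at hr
  rcases r with _|⟨x2,r⟩; · simp at hr
  rcases r with _|⟨x3,r⟩; · simp at hr
  rcases r with _|⟨x4,r⟩; · simp at hr
  rcases r with _|⟨x5,r⟩; · simp at hr
  rcases r with _|⟨x6,r⟩; · simp at hr
  rcases r with _|⟨x7,r⟩; · simp at hr
  rcases r with _|⟨x8,r⟩; · simp at hr
  rcases r with _|⟨x9,r⟩; · simp at hr
  rcases r with _|⟨x10,r⟩; · simp at hr
  rcases r with _|⟨x11,r⟩; · simp at hr
  rcases r with _|⟨x12,r⟩; · simp at hr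
  rcases r with _|⟨x13,r⟩
  · have hp : PySem.List.pyRange 0 12 2 = [0,2,4,6,8,10] := by decide
    rw [hp]
    simp [PySem.Str.join, PySem.Chars.join, List.intercalate, PySem.List.slice]
  · simp at hr

-- ===== VERDICT (by name: the statement is the Claim_ definition above) =====
theorem generate_mac_spec : Claim_equal_generate_mac := by
  intro id_ hdom
  unfold Spec_generate_mac
  have hdom2 : -2147483648 ≤ id_ ∧ id_ ≤ 2147483648 := by
    simpa [Dom_generate_mac, pvDomInt] using hdom
  by_cases hn : 0 < id_ + 1
  · set m : Nat := (id_ + 1).toNat with hmdef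
    have hm : 0 < m := by omega
    have hcast : (id_ + 1) = (m : Int) := by omega
    have hmlt : m < 16 ^ 12 := by
      have h16 : (16:Nat) ^ 12 = 281474976710656 := by norm_num
      omega
    have hlen : (toHex m).length ≤ 12 := toHex_len 12 m hm hmlt
    have hraw : base_16 (id_ + 1) = String.ofList (toHex m) := by
      rw [base_16, if_neg (by omega), hcast, base16Loop_spec m hm []]
      have hrr : ((toHex m).reverse.map (fun c => String.ofList [c])).reverse
          = (toHex m).map (fun c => String.ofList [c]) := by
        rw [← List.map_reverse, List.reverse_reverse]
      rw [List.nil_append, hrr, join_singletons]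
    simp only [generate_mac, generate_mac_alt]
    rw [hraw, if_pos hn, ← hmdef]
    have hc1 : ¬ 12 < PySem.Str.len (String.ofList (toHex m)) := by
      rw [PySem.Str.len_eq]; simp; omega
    have hc2 : ¬ 12 < (toHex m).length := by omega
    rw [if_neg hc1, if_neg hc2]
    have hR : padLoop (String.ofList (toHex m)).toList.reverse
        ((12 - ((String.ofList (toHex m)).toList.reverse.length : Int)).toNat)
        = (toHex m).reverse ++ List.replicate (12 - (toHex m).length) '0' := by
      rw [padLoop_spec]
      simp
    have hRlen : ((((toHex m).reverse ++ List.replicate (12 - (toHex m).length) '0').length : Nat) : Int) = 12 := by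
      simp; omega
    rw [hR, hRlen]
    rw [group_reverse _ (by simp; omega)]
    simp [List.reverse_append, List.reverse_replicate, List.reverse_reverse]
  · have hle : id_ + 1 ≤ 0 := by omega
    rcases lt_or_eq_of_le hle with hlt | heq
    · have hb : base_16 (id_ + 1) = "" := by
        rw [base_16, if_neg (by omega), base16Loop, if_neg (by omega)]
        rfl
      simp only [generate_mac, generate_mac_alt]
      rw [hb, if_neg (by omega : ¬ (0:Int) < id_ + 1)]
      decide
    · have hid : id_ = -1 := by omega
      subst hid
      decide
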